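-- pv_equiv track=rewrite | github.com/Raducu07/ANCHOR | app/portal_error_budget.py | _ui_message
-- ===== SOURCE A (Python) =====
-- from typing import Any, Dict, List, Optional, Tuple
--
-- def _ui_message(trust_state: str, reasons: List[str]) -> str:
--     if trust_state == "green":
--         return "Healthy"
--     if trust_state == "red":
--         return "At risk"
--     # yellow
--     if any(r.startswith("low_data") for r in reasons) or "no_data" in reasons:
--         return "Collecting data"
--     if any("5xx" in r for r in reasons):
--         return "Degraded: elevated errors"
--     if any("latency" in r for r in reasons):
--         return "Degraded: elevated latency"
--     if any("gov" in r for r in reasons):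
--         return "Degraded: elevated interventions"
--     return "Degraded"
-- ===== SOURCE B (Python) =====
-- from typing import List
--
-- _MESSAGES = [
--     "Collecting data",
--     "Degraded: elevated errors",
--     "Degraded: elevated latency",
--     "Degraded: elevated interventions",
--     "Degraded",
-- ]
--
-- def _rank(r: str) -> int:
--     # severity category of a single reason (0 = highest priority)
--     if r.startswith("low_data") or r == "no_data":
--         return 0
--     if "5xx" in r:
--         return 1
--     if "latency" in r:
--         return 2
--     if "gov" in r:
--         return 3
--     return 4
--
-- def _ui_message(trust_state: str, reasons: List[str]) -> str:
--     if trust_state == "green":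
--         return "Healthy"
--     if trust_state == "red":
--         return "At risk"
--     m = 4
--     for r in reasons:
--         m = min(m, _rank(r))
--     return _MESSAGES[m]
-- ===== Notes on version B (the rewrite author's own statement) =====
-- stated objective: alternative
-- what changed: Replaced A's four priority-ordered any() scans with a rank-and-reduce algorithm: each reason is mapped independently to a numeric severity rank 0-4, the ranks are reduced with min, and the message is looked up in a table indexed by the minimum rank.
import Mathlib
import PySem

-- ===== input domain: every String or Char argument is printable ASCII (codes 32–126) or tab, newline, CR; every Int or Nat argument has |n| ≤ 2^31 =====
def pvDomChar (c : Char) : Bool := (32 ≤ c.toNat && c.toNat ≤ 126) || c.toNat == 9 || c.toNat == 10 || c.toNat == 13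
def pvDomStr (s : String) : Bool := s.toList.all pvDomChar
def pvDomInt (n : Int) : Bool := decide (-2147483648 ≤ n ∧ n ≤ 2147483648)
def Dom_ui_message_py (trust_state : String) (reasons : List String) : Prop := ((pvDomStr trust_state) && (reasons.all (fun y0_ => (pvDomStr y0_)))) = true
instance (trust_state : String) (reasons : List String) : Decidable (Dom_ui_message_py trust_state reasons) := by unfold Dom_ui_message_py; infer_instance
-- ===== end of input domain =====

-- B replaces A's four priority-ordered any() scans with a rank-and-reduce
-- algorithm: each reason is mapped to a numeric severity rank, the ranks are
-- reduced with min, and the message is a table lookup (alternative decomposition).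

-- ===== PORT A =====
def ui_message_py (trust_state : String) (reasons : List String) : String :=
  if trust_state == "green" then "Healthy"
  else if trust_state == "red" then "At risk"
  else if (reasons.any (fun r => PySem.Str.startswith r "low_data")) || reasons.contains "no_data" then
    "Collecting data"
  else if reasons.any (fun r => PySem.Str.isIn "5xx" r) then "Degraded: elevated errors"
  else if reasons.any (fun r => PySem.Str.isIn "latency" r) then "Degraded: elevated latency"
  else if reasons.any (fun r => PySem.Str.isIn "gov" r) then "Degraded: elevated interventions"
  else "Degraded"

-- ===== PORT B =====
def uiMessages : List String :=
  ["Collecting data", "Degraded: elevated errors", "Degraded: elevated latency",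
   "Degraded: elevated interventions", "Degraded"]

-- severity category of a single reason (0 = highest priority)
def uiRank (r : String) : Nat :=
  if PySem.Str.startswith r "low_data" || r == "no_data" then 0
  else if PySem.Str.isIn "5xx" r then 1
  else if PySem.Str.isIn "latency" r then 2
  else if PySem.Str.isIn "gov" r then 3
  else 4

def ui_message_py_alt (trust_state : String) (reasons : List String) : String :=
  if trust_state == "green" then "Healthy"
  else if trust_state == "red" then "At risk"
  else
    -- the min-fold accumulator starts at 4, so the index is always < 5:
    -- getD is exact for Python's in-range list indexing
    uiMessages.getD (reasons.foldl (fun m r => min m (uiRank r)) 4) "Degraded"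

-- ===== PRECONDITION & SPEC =====
def Spec_ui_message_py (trust_state : String) (reasons : List String) (out : String) : Prop := out = ui_message_py_alt trust_state reasons
instance (trust_state : String) (reasons : List String) (out : String) : Decidable (Spec_ui_message_py trust_state reasons out) := by unfold Spec_ui_message_py; infer_instance

-- ===== CLAIM (what is proved, stated in full; the proofs are below) =====
def Claim_equal_ui_message_py : Prop := ∀ (trust_state : String) (reasons : List String), Dom_ui_message_py trust_state reasons → Spec_ui_message_py trust_state reasons (ui_message_py trust_state reasons)

-- ===== LEMMAS AND PROOFS =====

theorem uiMin_le_iff (rs : List String) (a k : Nat) :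
    rs.foldl (fun m r => min m (uiRank r)) a ≤ k ↔ a ≤ k ∨ ∃ r ∈ rs, uiRank r ≤ k := by
  induction rs generalizing a with
  | nil => simp
  | cons x xs ih =>
    simp only [List.foldl_cons, ih, min_le_iff, List.mem_cons]
    constructor
    · rintro (⟨h | h⟩ | ⟨r, hr, h⟩)
      · exact Or.inl h
      · exact Or.inr ⟨x, Or.inl rfl, h⟩
      · exact Or.inr ⟨r, Or.inr hr, h⟩
    · rintro (h | ⟨r, hx | hr, h⟩)
      · exact Or.inl (Or.inl h)
      · exact Or.inl (Or.inr (hx ▸ h))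
      · exact Or.inr ⟨r, hr, h⟩

theorem uiMin_le_four (rs : List String) :
    rs.foldl (fun m r => min m (uiRank r)) 4 ≤ 4 := by
  rw [uiMin_le_iff]; exact Or.inl le_rfl

theorem uiRank_le_zero (r : String) :
    uiRank r ≤ 0 ↔ (PySem.Str.startswith r "low_data" || r == "no_data") = true := by
  unfold uiRank
  split_ifs with h1 h2 h3 h4
  · exact iff_of_true le_rfl h1
  · exact iff_of_false (by omega) h1
  · exact iff_of_false (by omega) h1
  · exact iff_of_false (by omega) h1
  · exact iff_of_false (by omega) h1

theorem uiRank_le_one (r : String) :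
    uiRank r ≤ 1 ↔ (PySem.Str.startswith r "low_data" || r == "no_data") = true ∨
      PySem.Str.isIn "5xx" r = true := by
  unfold uiRank
  split_ifs with h1 h2 h3 h4
  · exact iff_of_true (by omega) (Or.inl h1)
  · exact iff_of_true le_rfl (Or.inr h2)
  · exact iff_of_false (by omega) (by tauto)
  · exact iff_of_false (by omega) (by tauto)
  · exact iff_of_false (by omega) (by tauto)

theorem uiRank_le_two (r : String) :
    uiRank r ≤ 2 ↔ (PySem.Str.startswith r "low_data" || r == "no_data") = true ∨
      PySem.Str.isIn "5xx" r = true ∨ PySem.Str.isIn "latency" r = true := by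
  unfold uiRank
  split_ifs with h1 h2 h3 h4
  · exact iff_of_true (by omega) (Or.inl h1)
  · exact iff_of_true (by omega) (Or.inr (Or.inl h2))
  · exact iff_of_true le_rfl (Or.inr (Or.inr h3))
  · exact iff_of_false (by omega) (by tauto)
  · exact iff_of_false (by omega) (by tauto)

theorem uiRank_le_three (r : String) :
    uiRank r ≤ 3 ↔ (PySem.Str.startswith r "low_data" || r == "no_data") = true ∨
      PySem.Str.isIn "5xx" r = true ∨ PySem.Str.isIn "latency" r = true ∨
      PySem.Str.isIn "gov" r = true := by
  unfold uiRank
  split_ifs with h1 h2 h3 h4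
  · exact iff_of_true (by omega) (Or.inl h1)
  · exact iff_of_true (by omega) (Or.inr (Or.inl h2))
  · exact iff_of_true (by omega) (Or.inr (Or.inr (Or.inl h3)))
  · exact iff_of_true le_rfl (Or.inr (Or.inr (Or.inr h4)))
  · exact iff_of_false (by omega) (by tauto)

theorem uiCollecting_eq (rs : List String) :
    ((rs.any (fun r => PySem.Str.startswith r "low_data")) || rs.contains "no_data") = true ↔
      ∃ r ∈ rs, (PySem.Str.startswith r "low_data" || r == "no_data") = true := by
  rw [Bool.or_eq_true, List.any_eq_true]
  constructor
  · rintro (⟨r, hr, h⟩ | hm)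
    · exact ⟨r, hr, by rw [Bool.or_eq_true]; exact Or.inl h⟩
    · refine ⟨"no_data", by simpa using hm, ?_⟩
      rw [Bool.or_eq_true]; exact Or.inr (beq_iff_eq.mpr rfl)
  · rintro ⟨r, hr, h⟩
    rw [Bool.or_eq_true] at h
    rcases h with h | h
    · exact Or.inl ⟨r, hr, h⟩
    · refine Or.inr ?_
      rw [beq_iff_eq] at h; subst h; simpa using hr

-- ===== VERDICT (by name: the statement is the Claim_ definition above) =====
theorem ui_message_py_spec : Claim_equal_ui_message_py := by
  intro ts rs _
  unfold Spec_ui_message_py ui_message_py ui_message_py_alt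
  by_cases hg : (ts == "green") = true
  · rw [if_pos hg, if_pos hg]
  rw [if_neg hg, if_neg hg]
  by_cases hred : (ts == "red") = true
  · rw [if_pos hred, if_pos hred]
  rw [if_neg hred, if_neg hred]
  set M := rs.foldl (fun m r => min m (uiRank r)) 4 with hM
  by_cases h0 : ((rs.any (fun r => PySem.Str.startswith r "low_data")) || rs.contains "no_data") = true
  · have hle : M ≤ 0 := by
      rw [hM, uiMin_le_iff]
      refine Or.inr ?_
      obtain ⟨r, hrm, h⟩ := (uiCollecting_eq rs).mp h0
      exact ⟨r, hrm, (uiRank_le_zero r).mpr h⟩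
    have hMv : M = 0 := by omega
    rw [if_pos h0, hMv]
    rfl
  · rw [if_neg h0]
    have hn0 : ¬ M ≤ 0 := by
      rw [hM, uiMin_le_iff]
      rintro (h | ⟨r, hrm, h⟩)
      · omega
      · exact h0 ((uiCollecting_eq rs).mpr ⟨r, hrm, (uiRank_le_zero r).mp h⟩)
    by_cases h1 : rs.any (fun r => PySem.Str.isIn "5xx" r) = true
    · have hle : M ≤ 1 := by
        rw [hM, uiMin_le_iff]
        obtain ⟨r, hrm, h⟩ := List.any_eq_true.mp h1
        exact Or.inr ⟨r, hrm, (uiRank_le_one r).mpr (Or.inr h)⟩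
      have hMv : M = 1 := by omega
      rw [if_pos h1, hMv]
      rfl
    · rw [if_neg h1]
      have hn1 : ¬ M ≤ 1 := by
        rw [hM, uiMin_le_iff]
        rintro (h | ⟨r, hrm, h⟩)
        · omega
        · rcases (uiRank_le_one r).mp h with h | h
          · exact h0 ((uiCollecting_eq rs).mpr ⟨r, hrm, h⟩)
          · exact h1 (List.any_eq_true.mpr ⟨r, hrm, h⟩)
      by_cases h2 : rs.any (fun r => PySem.Str.isIn "latency" r) = true
      · have hle : M ≤ 2 := by
          rw [hM, uiMin_le_iff]
          obtain ⟨r, hrm, h⟩ := List.any_eq_true.mp h2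
          exact Or.inr ⟨r, hrm, (uiRank_le_two r).mpr (Or.inr (Or.inr h))⟩
        have hMv : M = 2 := by omega
        rw [if_pos h2, hMv]
        rfl
      · rw [if_neg h2]
        have hn2 : ¬ M ≤ 2 := by
          rw [hM, uiMin_le_iff]
          rintro (h | ⟨r, hrm, h⟩)
          · omega
          · rcases (uiRank_le_two r).mp h with h | h | h
            · exact h0 ((uiCollecting_eq rs).mpr ⟨r, hrm, h⟩)
            · exact h1 (List.any_eq_true.mpr ⟨r, hrm, h⟩)
            · exact h2 (List.any_eq_true.mpr ⟨r, hrm, h⟩)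
        by_cases h3 : rs.any (fun r => PySem.Str.isIn "gov" r) = true
        · have hle : M ≤ 3 := by
            rw [hM, uiMin_le_iff]
            obtain ⟨r, hrm, h⟩ := List.any_eq_true.mp h3
            exact Or.inr ⟨r, hrm, (uiRank_le_three r).mpr (Or.inr (Or.inr (Or.inr h)))⟩
          have hMv : M = 3 := by omega
          rw [if_pos h3, hMv]
          rfl
        · rw [if_neg h3]
          have hn3 : ¬ M ≤ 3 := by
            rw [hM, uiMin_le_iff]
            rintro (h | ⟨r, hrm, h⟩)
            · omega
            · rcases (uiRank_le_three r).mp h with h | h | h | h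
              · exact h0 ((uiCollecting_eq rs).mpr ⟨r, hrm, h⟩)
              · exact h1 (List.any_eq_true.mpr ⟨r, hrm, h⟩)
              · exact h2 (List.any_eq_true.mpr ⟨r, hrm, h⟩)
              · exact h3 (List.any_eq_true.mpr ⟨r, hrm, h⟩)
          have h4 : M ≤ 4 := hM ▸ uiMin_le_four rs
          have hMv : M = 4 := by omega
          rw [hMv]
          rfl
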